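-- pv_equiv track=rewrite | github.com/pressroomhq/pressroom-app | services/engine.py | _build_asset_map_block
-- ===== SOURCE A (Python) =====
-- def _build_asset_map_block(assets: list[dict]) -> str:
--     """Build a COMPANY DIGITAL FOOTPRINT section from asset records."""
--     if not assets:
--         return ""
--
--     grouped: dict[str, list[dict]] = {}
--     for a in assets:
--         grouped.setdefault(a.get("asset_type", "other"), []).append(a)
--
--     parts = ["COMPANY DIGITAL FOOTPRINT:"]
--     for atype, items in sorted(grouped.items()):
--         parts.append(f"\n  [{atype.upper()}]")
--         for item in items:
--             label = item.get("label", "")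
--             url = item.get("url", "")
--             desc = item.get("description", "")
--             line = f"    - {url}"
--             if label:
--                 line += f'  ({label})'
--             if desc:
--                 line += f'  — {desc}'
--             parts.append(line)
--
--     return "\n".join(parts)
-- ===== SOURCE B (Python) =====
-- def _build_asset_map_block(assets: list[dict]) -> str:
--     """Build a COMPANY DIGITAL FOOTPRINT section from asset records."""
--     if not assets:
--         return ""
--
--     def key(a):
--         return a.get("asset_type", "other")
--
--     def fmt(item):
--         line = f'    - {item.get("url", "")}'
--         if item.get("label", ""):
--             line += f'  ({item.get("label", "")})'
--         if item.get("description", ""):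
--             line += f'  \u2014 {item.get("description", "")}'
--         return line
--
--     parts = ["COMPANY DIGITAL FOOTPRINT:"]
--     for atype in sorted({key(a) for a in assets}):
--         parts.append(f"\n  [{atype.upper()}]")
--         parts.extend(fmt(a) for a in assets if key(a) == atype)
--     return "\n".join(parts)
-- ===== Notes on version B (the rewrite author's own statement) =====
-- stated objective: idiomatic
-- what changed: Replaces the setdefault-dict grouping pass with sorting the distinct asset types once and emitting, per type, the assets selected by a filtering comprehension (sort of the deduplicated keys + per-type filter instead of dict insertion + sorted(items())).
import Mathlib
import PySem

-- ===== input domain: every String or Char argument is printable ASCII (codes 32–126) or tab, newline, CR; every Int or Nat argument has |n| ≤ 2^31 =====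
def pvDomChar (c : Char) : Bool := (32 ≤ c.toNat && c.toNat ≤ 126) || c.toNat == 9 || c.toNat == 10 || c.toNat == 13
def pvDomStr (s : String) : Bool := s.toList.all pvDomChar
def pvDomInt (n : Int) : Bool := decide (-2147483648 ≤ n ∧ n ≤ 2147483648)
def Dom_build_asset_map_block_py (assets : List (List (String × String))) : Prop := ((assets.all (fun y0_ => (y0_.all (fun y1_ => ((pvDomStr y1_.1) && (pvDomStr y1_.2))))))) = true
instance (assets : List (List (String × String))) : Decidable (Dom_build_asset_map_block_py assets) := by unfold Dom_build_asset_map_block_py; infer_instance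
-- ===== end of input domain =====

-- B replaces A's setdefault-dict grouping with sorting the distinct asset types and a per-type
-- filter over the original list (more idiomatic; not claimed faster).

-- helpers shared by both ports: dict .get, the type key, and the per-item line —
-- this formatting code is literally identical in both Python sources
def pvGetD (a : List (String × String)) (k dflt : String) : String :=
  (PySem.Dict.mk a).getD k dflt

def pvKey (a : List (String × String)) : String := pvGetD a "asset_type" "other"

def pvHdr (t : String) : String := "\n  [" ++ PySem.Str.upper t ++ "]"

def pvFmt (item : List (String × String)) : String :=
  let label := pvGetD item "label" ""
  let url := pvGetD item "url" ""
  let desc := pvGetD item "description" ""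
  let line := "    - " ++ url
  let line := if label ≠ "" then line ++ "  (" ++ label ++ ")" else line
  if desc ≠ "" then line ++ "  — " ++ desc else line

-- ===== PORT A =====
-- grouped.setdefault(k, []).append(a) is d.modify k [] (· ++ [a]) (same position/append semantics);
-- sorted(grouped.items()) compares tuples by the (distinct) first components, so key fst is exact.
def build_asset_map_block_py (assets : List (List (String × String))) : String :=
  if assets = [] then ""
  else
    let grouped := assets.foldl (fun d a => d.modify (pvKey a) [] (· ++ [a])) PySem.Dict.empty
    let parts := (PySem.List.sorted grouped.items (fun p => p.1) false).foldl
      (fun parts pr =>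
        let parts := parts ++ [pvHdr pr.1]
        pr.2.foldl (fun ps item => ps ++ [pvFmt item]) parts)
      ["COMPANY DIGITAL FOOTPRINT:"]
    PySem.Str.join "\n" parts

-- ===== PORT B =====
def build_asset_map_block_py_alt (assets : List (List (String × String))) : String :=
  if assets = [] then ""
  else
    let types := PySem.List.sorted (PySem.Set.ofList (assets.map pvKey)) (fun t => t) false
    let parts := types.foldl
      (fun ps t => (ps ++ [pvHdr t]) ++ (assets.filter (fun a => pvKey a == t)).map pvFmt)
      ["COMPANY DIGITAL FOOTPRINT:"]
    PySem.Str.join "\n" parts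

-- ===== PRECONDITION & SPEC =====
def Spec_build_asset_map_block_py (assets : List (List (String × String))) (out : String) : Prop := out = build_asset_map_block_py_alt assets
instance (assets : List (List (String × String))) (out : String) : Decidable (Spec_build_asset_map_block_py assets out) := by unfold Spec_build_asset_map_block_py; infer_instance

-- ===== CLAIM (what is proved, stated in full; the proofs are below) =====
def Claim_equal_build_asset_map_block_py : Prop := ∀ (assets : List (List (String × String))), Dom_build_asset_map_block_py assets → Spec_build_asset_map_block_py assets (build_asset_map_block_py assets)

-- ===== LEMMAS AND PROOFS =====

-- appending one element per step is acc ++ map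
theorem pvFoldl_app_singleton {α β : Type} (f : α → β) (l : List α) (acc : List β) :
    l.foldl (fun ps x => ps ++ [f x]) acc = acc ++ l.map f := by
  induction l generalizing acc with
  | nil => simp
  | cons x t ih => simp [ih]

theorem pvSetUpdateNil {α : Type} [BEq α] (xs : List α) :
    PySem.Set.update ([] : PySem.Set α) xs = PySem.Set.ofList xs := by
  rw [PySem.Set.ofList_eq_foldl]; rfl

theorem pvMain (assets : List (List (String × String))) :
    build_asset_map_block_py assets = build_asset_map_block_py_alt assets := by
  by_cases h : assets = []
  · simp [build_asset_map_block_py, build_asset_map_block_py_alt, h]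
  · simp only [build_asset_map_block_py, build_asset_map_block_py_alt, if_neg h]
    apply congrArg
    set G := assets.foldl (fun d a => d.modify (pvKey a) [] (· ++ [a])) PySem.Dict.empty with hGdef
    set K := PySem.Set.ofList (assets.map pvKey) with hKdef
    have h1 : G.keys = K := by
      have := PySem.Dict.keys_foldl_modify_key assets pvKey ([] : List (List (String × String)))
        (fun _ a l => l ++ [a]) PySem.Dict.empty
      simpa [pvSetUpdateNil] using this
    have hnd : G.keys.Nodup := by
      exact PySem.Dict.nodup_keys_foldl_modify_key assets pvKey _ (fun _ a l => l ++ [a]) _ (by simp)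
    have hG : G = (assets.map (fun a => (pvKey a, a))).foldl
        (fun d p => d.modify p.1 [] (· ++ [p.2])) PySem.Dict.empty := by
      rw [List.foldl_map]
    have h2 : ∀ c, G.getD c [] = assets.filter (fun a => pvKey a == c) := by
      intro c
      rw [hG, PySem.Dict.getD_foldl_modify_append]
      simp [List.filter_map, List.map_map, Function.comp_def]
    have h3 : G.items = K.map (fun k => (k, assets.filter (fun a => pvKey a == k))) := by
      rw [PySem.Dict.items_eq_map_keys G hnd ([] : List (List (String × String))), h1]
      exact List.map_congr_left (fun k _ => by rw [h2])
    have h4 : PySem.List.sorted G.items (fun p => p.1) false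
        = (PySem.List.sorted K (fun t => t) false).map
            (fun k => (k, assets.filter (fun a => pvKey a == k))) := by
      apply PySem.List.sorted_eq_of_perm_of_pairwise_lt
      · rw [h3]; exact (PySem.List.sorted_perm K (fun t => t) false).map _
      · exact List.Pairwise.map _ (fun a b hab => hab)
          (PySem.List.sorted_ofList_pairwise_lt (assets.map pvKey))
    have hbody : (fun (parts : List String) (pr : String × List (List (String × String))) =>
        pr.2.foldl (fun ps item => ps ++ [pvFmt item]) (parts ++ [pvHdr pr.1]))
        = fun parts pr => (parts ++ [pvHdr pr.1]) ++ pr.2.map pvFmt := by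
      funext parts pr; exact pvFoldl_app_singleton pvFmt pr.2 _
    rw [hbody, h4, List.foldl_map]

-- ===== VERDICT (by name: the statement is the Claim_ definition above) =====
theorem build_asset_map_block_py_spec : Claim_equal_build_asset_map_block_py := by
  intro assets _
  exact pvMain assets
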